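-- pv_equiv track=rewrite | github.com/olezha300/Yandex_handbook_python | 1:2 семестр/Яндекс lms/4.4. КР «Функции и их особенности в Python»/4.4_05_Puteshestvie_krolika.py | rabbit
-- ===== SOURCE A (Python) =====
-- def rabbit(start, finish, length):
--     a = [[start]]
--     b = []
--     for _ in range(length):
--         for way in a:
--             if way[-1] + 2 not in way:
--                 b.append(way + [way[-1] + 2])
--             if way[-1] + 1 not in way:
--                 b.append(way + [way[-1] + 1])
--             if way[-1] - 2 not in way:
--                 b.append(way + [way[-1] - 2])
--             if way[-1] - 1 not in way:
--                 b.append(way + [way[-1] - 1])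
--         a = b
--         b = []
--     return list(filter(lambda x: x[-1] == finish, a))
-- ===== SOURCE B (Python) =====
-- def rabbit(start, finish, length):
--     def dfs(cur, path, steps):
--         if steps <= 0:
--             return [path] if cur == finish else []
--         res = []
--         for d in (2, 1, -2, -1):
--             nxt = cur + d
--             if nxt not in path:
--                 res += dfs(nxt, path + [nxt], steps - 1)
--         return res
--     return dfs(start, [start], length)
-- ===== Notes on version B (the rewrite author's own statement) =====
-- stated objective: alternative
-- what changed: Replaced the level-by-level BFS that materialises every frontier list with a recursive DFS on the call stack carrying (current cell, path, remaining steps), preserving the +2,+1,-2,-1 expansion order so leaves appear in the same order.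
import Mathlib
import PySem

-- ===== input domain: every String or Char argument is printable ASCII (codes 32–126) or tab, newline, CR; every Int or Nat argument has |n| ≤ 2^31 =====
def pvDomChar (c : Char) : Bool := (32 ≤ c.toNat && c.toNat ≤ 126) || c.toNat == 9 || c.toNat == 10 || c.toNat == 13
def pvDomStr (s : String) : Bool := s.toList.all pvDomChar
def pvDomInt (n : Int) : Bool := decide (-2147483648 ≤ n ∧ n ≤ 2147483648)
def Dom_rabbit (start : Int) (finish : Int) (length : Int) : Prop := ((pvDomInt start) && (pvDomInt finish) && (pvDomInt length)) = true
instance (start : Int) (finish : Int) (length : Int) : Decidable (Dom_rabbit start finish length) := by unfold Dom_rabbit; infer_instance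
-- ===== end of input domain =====

-- B replaces A's frontier-list BFS by a call-stack DFS with the same +2,+1,-2,-1 child order (alternative decomposition; same results in the same order).

-- ===== PORT A =====
-- way[-1]; every list reached is nonempty ([start] plus appends), so the default 0 is unreachable
def rabbitLast (xs : List Int) : Int := (PySem.List.pyGet? xs (-1)).getD 0

def rabbit (start : Int) (finish : Int) (length : Int) : List (List Int) :=
  ((PySem.List.pyRange 0 length 1).foldl (fun a _ =>
    a.foldl (fun b way =>
      let b := if decide ((rabbitLast way + 2) ∈ way) then b else b ++ [way ++ [rabbitLast way + 2]]
      let b := if decide ((rabbitLast way + 1) ∈ way) then b else b ++ [way ++ [rabbitLast way + 1]]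
      let b := if decide ((rabbitLast way - 2) ∈ way) then b else b ++ [way ++ [rabbitLast way - 2]]
      if decide ((rabbitLast way - 1) ∈ way) then b else b ++ [way ++ [rabbitLast way - 1]]) [])
    [[start]]).filter (fun x => rabbitLast x == finish)

-- ===== PORT B =====
def rabbitDfs (finish : Int) (cur : Int) (path : List Int) (steps : Int) : List (List Int) :=
  if steps ≤ 0 then
    if cur == finish then [path] else []
  else
    [(2 : Int), 1, -2, -1].foldl (fun res d =>
      if decide ((cur + d) ∈ path) then res
      else res ++ rabbitDfs finish (cur + d) (path ++ [cur + d]) (steps - 1)) []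
termination_by steps.toNat
decreasing_by omega

def rabbit_alt (start : Int) (finish : Int) (length : Int) : List (List Int) :=
  rabbitDfs finish start [start] length

-- ===== PRECONDITION & SPEC =====
def Spec_rabbit (start : Int) (finish : Int) (length : Int) (out : List (List Int)) : Prop := out = rabbit_alt start finish length
instance (start : Int) (finish : Int) (length : Int) (out : List (List Int)) : Decidable (Spec_rabbit start finish length out) := by unfold Spec_rabbit; infer_instance

-- ===== CLAIM (what is proved, stated in full; the proofs are below) =====
def Claim_equal_rabbit : Prop := ∀ (start : Int) (finish : Int) (length : Int), Dom_rabbit start finish length → Spec_rabbit start finish length (rabbit start finish length)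

-- ===== LEMMAS AND PROOFS =====

-- one BFS expansion step of a single path, children in A's order
def rabbitExpand (way : List Int) : List (List Int) :=
  [(2 : Int), 1, -2, -1].flatMap (fun d =>
    if decide ((rabbitLast way + d) ∈ way) then [] else [way ++ [rabbitLast way + d]])

-- n BFS levels
def rabbitIter : Nat → List (List Int) → List (List Int)
  | 0, a => a
  | n + 1, a => rabbitIter n (a.flatMap rabbitExpand)

lemma rabbitLast_append (xs : List Int) (x : Int) : rabbitLast (xs ++ [x]) = x := by
  simp [rabbitLast, PySem.List.pyGet?_neg_one_append_singleton]

lemma bodyA_eq (w : List Int) (b0 : List (List Int)) :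
    (let b := if decide ((rabbitLast w + 2) ∈ w) then b0 else b0 ++ [w ++ [rabbitLast w + 2]]
     let b := if decide ((rabbitLast w + 1) ∈ w) then b else b ++ [w ++ [rabbitLast w + 1]]
     let b := if decide ((rabbitLast w - 2) ∈ w) then b else b ++ [w ++ [rabbitLast w - 2]]
     if decide ((rabbitLast w - 1) ∈ w) then b else b ++ [w ++ [rabbitLast w - 1]])
    = b0 ++ rabbitExpand w := by
  simp only [rabbitExpand, List.flatMap_cons, List.flatMap_nil, Int.sub_eq_add_neg,
    List.append_nil]
  split_ifs <;> simp_all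

lemma inner_foldl (a : List (List Int)) : ∀ b0 : List (List Int),
    a.foldl (fun b way =>
      let b := if decide ((rabbitLast way + 2) ∈ way) then b else b ++ [way ++ [rabbitLast way + 2]]
      let b := if decide ((rabbitLast way + 1) ∈ way) then b else b ++ [way ++ [rabbitLast way + 1]]
      let b := if decide ((rabbitLast way - 2) ∈ way) then b else b ++ [way ++ [rabbitLast way - 2]]
      if decide ((rabbitLast way - 1) ∈ way) then b else b ++ [way ++ [rabbitLast way - 1]]) b0
    = b0 ++ a.flatMap rabbitExpand := by
  induction a with
  | nil => simp
  | cons w t ih =>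
    intro b0
    rw [List.foldl_cons, List.flatMap_cons]
    show t.foldl _ (let b := if decide ((rabbitLast w + 2) ∈ w) then b0 else b0 ++ [w ++ [rabbitLast w + 2]]
     let b := if decide ((rabbitLast w + 1) ∈ w) then b else b ++ [w ++ [rabbitLast w + 1]]
     let b := if decide ((rabbitLast w - 2) ∈ w) then b else b ++ [w ++ [rabbitLast w - 2]]
     if decide ((rabbitLast w - 1) ∈ w) then b else b ++ [w ++ [rabbitLast w - 1]]) = _
    rw [bodyA_eq, ih, List.append_assoc]

lemma outer_foldl (l : List Int) (a : List (List Int)) :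
    l.foldl (fun a _ =>
      a.foldl (fun b way =>
        let b := if decide ((rabbitLast way + 2) ∈ way) then b else b ++ [way ++ [rabbitLast way + 2]]
        let b := if decide ((rabbitLast way + 1) ∈ way) then b else b ++ [way ++ [rabbitLast way + 1]]
        let b := if decide ((rabbitLast way - 2) ∈ way) then b else b ++ [way ++ [rabbitLast way - 2]]
        if decide ((rabbitLast way - 1) ∈ way) then b else b ++ [way ++ [rabbitLast way - 1]]) []) a
    = rabbitIter l.length a := by
  induction l generalizing a with
  | nil => rfl
  | cons x t ih =>
    simp only [List.foldl_cons, List.length_cons, rabbitIter]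
    rw [inner_foldl, List.nil_append]
    exact ih _

lemma rabbitIter_append (n : Nat) : ∀ xs ys : List (List Int),
    rabbitIter n (xs ++ ys) = rabbitIter n xs ++ rabbitIter n ys := by
  induction n with
  | zero => intro xs ys; rfl
  | succ n ih => intro xs ys; simp [rabbitIter, List.flatMap_append, ih]

lemma rabbitIter_nil (n : Nat) : rabbitIter n [] = [] := by
  induction n with
  | zero => rfl
  | succ n ih => simp [rabbitIter, ih]

lemma foldl_extend {α β : Type} (g : α → List β) (l : List α) : ∀ r0 : List β,
    l.foldl (fun r x => r ++ g x) r0 = r0 ++ l.flatMap g := by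
  induction l with
  | nil => simp
  | cons x t ih => intro r0; simp [ih, List.append_assoc]

lemma dfs_eq (finish : Int) : ∀ (n : Nat) (s : Int), s.toNat = n →
    ∀ (path : List Int) (cur : Int), rabbitLast path = cur →
    rabbitDfs finish cur path s
      = (rabbitIter n [path]).filter (fun x => rabbitLast x == finish) := by
  intro n
  induction n with
  | zero =>
    intro s hs path cur hlast
    have h0 : s ≤ 0 := by omega
    rw [rabbitDfs, if_pos h0]
    subst hlast
    show _ = List.filter _ [path]
    cases hb : rabbitLast path == finish <;> simp [List.filter, hb]
  | succ n ih =>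
    intro s hs path cur hlast
    have h0 : ¬ s ≤ 0 := by omega
    rw [rabbitDfs, if_neg h0]
    have hbody : ([(2 : Int), 1, -2, -1].foldl (fun res d =>
        if decide ((cur + d) ∈ path) then res
        else res ++ rabbitDfs finish (cur + d) (path ++ [cur + d]) (s - 1)) [])
        = [(2 : Int), 1, -2, -1].flatMap (fun d =>
            if decide ((cur + d) ∈ path) then []
            else rabbitDfs finish (cur + d) (path ++ [cur + d]) (s - 1)) := by
      calc ([(2 : Int), 1, -2, -1].foldl (fun res d =>
              if decide ((cur + d) ∈ path) then res
              else res ++ rabbitDfs finish (cur + d) (path ++ [cur + d]) (s - 1)) [])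
          = [(2 : Int), 1, -2, -1].foldl (fun res d =>
              res ++ (if decide ((cur + d) ∈ path) then []
                else rabbitDfs finish (cur + d) (path ++ [cur + d]) (s - 1))) [] := by
            apply PySem.List.foldl_congr_mem
            intro r d _
            split_ifs <;> simp
        _ = _ := by rw [foldl_extend]; simp
    rw [hbody]
    show _ = (rabbitIter n ([path].flatMap rabbitExpand)).filter _
    have hexp : [path].flatMap rabbitExpand = rabbitExpand path := by simp
    rw [hexp, rabbitExpand, hlast]
    simp only [List.flatMap_cons, List.flatMap_nil, List.append_nil,
      rabbitIter_append, List.filter_append]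
    have step : ∀ d : Int,
        (if decide ((cur + d) ∈ path) then ([] : List (List Int))
         else rabbitDfs finish (cur + d) (path ++ [cur + d]) (s - 1))
        = (rabbitIter n (if decide ((cur + d) ∈ path) then []
            else [path ++ [cur + d]])).filter (fun x => rabbitLast x == finish) := by
      intro d
      split_ifs with h
      · simp [rabbitIter_nil]
      · exact ih (s - 1) (by omega) (path ++ [cur + d]) (cur + d) (rabbitLast_append _ _)
    rw [step 2, step 1, step (-2), step (-1)]

-- ===== VERDICT (by name: the statement is the Claim_ definition above) =====
theorem rabbit_spec : Claim_equal_rabbit := by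
  intro start finish length _
  unfold Spec_rabbit rabbit rabbit_alt
  rw [outer_foldl]
  rw [dfs_eq finish ((PySem.List.pyRange 0 length 1).length) length
    (by rw [PySem.List.length_pyRange_one]; omega) [start] start
    (by simp [rabbitLast, PySem.List.pyGet?_neg_one])]
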